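-- pv_equiv track=rewrite | github.com/ahmedmansour0012/highlighting | app/core/search/matching.py | find_reconstructable_codes
-- ===== SOURCE A (Python) =====
-- def find_reconstructable_codes(found_parts: list[str], original_codes: list[str]) -> list[str]:
--     word_set = set(part.strip().casefold() for part in found_parts)
--     result = []
--     for code in original_codes:
--         s = code.strip().casefold()
--         n = len(s)
--         dp = [False] * (n + 1)
--         dp[0] = True
--         for i in range(1, n + 1):
--             for j in range(i):
--                 if dp[j] and s[j:i] in word_set:
--                     dp[i] = True
--                     break
--         if dp[n]:
--             result.append(code)
--     return result
-- ===== SOURCE B (Python) =====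
-- def find_reconstructable_codes(found_parts: list[str], original_codes: list[str]) -> list[str]:
--     words = {part.strip().casefold() for part in found_parts}
--     lens = sorted({len(w) for w in words if w})
--     result = []
--     for code in original_codes:
--         s = code.strip().casefold()
--         n = len(s)
--         dp = [True]
--         for i in range(1, n + 1):
--             dp.append(any(L <= i and dp[i - L] and s[i - L:i] in words for L in lens))
--         if dp[n]:
--             result.append(code)
--     return result
-- ===== Notes on version B (the rewrite author's own statement) =====
-- stated objective: alternative
-- what changed: Replaces A's inner scan over all split points j<i in the word-break DP by a DP that at each position only tries offsets equal to the distinct nonempty word lengths, precomputed once from the word set, and builds the dp table by appending instead of preallocating and mutating.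
import Mathlib
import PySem

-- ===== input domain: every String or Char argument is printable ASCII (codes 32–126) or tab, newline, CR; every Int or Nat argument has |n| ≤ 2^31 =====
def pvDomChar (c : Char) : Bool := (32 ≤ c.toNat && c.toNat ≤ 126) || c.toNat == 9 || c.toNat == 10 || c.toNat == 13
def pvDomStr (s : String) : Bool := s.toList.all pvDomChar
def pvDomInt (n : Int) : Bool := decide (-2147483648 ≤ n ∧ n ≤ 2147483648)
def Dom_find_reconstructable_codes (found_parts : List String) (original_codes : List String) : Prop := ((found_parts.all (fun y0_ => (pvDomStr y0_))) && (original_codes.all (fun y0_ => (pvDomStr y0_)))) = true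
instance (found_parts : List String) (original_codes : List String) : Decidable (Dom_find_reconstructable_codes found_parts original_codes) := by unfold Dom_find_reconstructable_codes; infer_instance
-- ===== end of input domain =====

-- B replaces A's inner scan over all split points by a scan over the distinct
-- (nonempty) word lengths only, precomputed once from the word set (objective: alternative).


-- ===== PORT A =====
-- code.strip().casefold(): casefold = lower on the ASCII domain (exact there)
def pvNorm (s : String) : List Char := PySem.Chars.lower (PySem.Chars.strip s.toList)

-- A's inner word-break DP for one normalized code s: dp over all split points j < i
def pvACheck (W : PySem.Set (List Char)) (s : List Char) : Bool :=
  let n := s.length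
  let dp0 := PySem.List.pySetD (List.replicate (n + 1) false) 0 true
  let dp := (PySem.List.pyRange 1 ((n : Int) + 1) 1).foldl (fun dp i =>
      -- 'for j in range(i): if dp[j] and s[j:i] in word_set: dp[i]=True; break'
      if (PySem.List.pyRange 0 i 1).any (fun j =>
            PySem.List.pyGetD dp j false &&
            W.contains (PySem.List.slice s (some j) (some i)))
      then PySem.List.pySetD dp i true else dp) dp0
  PySem.List.pyGetD dp (n : Int) false

def find_reconstructable_codes (found_parts : List String) (original_codes : List String) : List String :=
  let word_set : PySem.Set (List Char) := PySem.Set.ofList (found_parts.map pvNorm)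
  original_codes.foldl (fun result code =>
    if pvACheck word_set (pvNorm code) then result ++ [code] else result) []

-- ===== PORT B =====
-- sorted({len(w) for w in words if w})
def pvBLens (W : PySem.Set (List Char)) : List Int :=
  PySem.List.sorted (PySem.Set.ofList ((W.filter (fun w => !w.isEmpty)).map (fun w => (w.length : Int)))) (fun x => x) false

-- B's DP for one code: only offsets that are distinct word lengths; dp grows by append
def pvBCheck (W : PySem.Set (List Char)) (lens : List Int) (s : List Char) : Bool :=
  let n := s.length
  let dp := (PySem.List.pyRange 1 ((n : Int) + 1) 1).foldl (fun dp i =>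
      dp ++ [lens.any (fun L =>
        decide (L ≤ i) && PySem.List.pyGetD dp (i - L) false &&
        W.contains (PySem.List.slice s (some (i - L)) (some i)))]) [true]
  PySem.List.pyGetD dp (n : Int) false

def find_reconstructable_codes_alt (found_parts : List String) (original_codes : List String) : List String :=
  let words : PySem.Set (List Char) := PySem.Set.ofList (found_parts.map pvNorm)
  let lens := pvBLens words
  original_codes.foldl (fun result code =>
    if pvBCheck words lens (pvNorm code) then result ++ [code] else result) []

-- ===== PRECONDITION & SPEC =====
def Spec_find_reconstructable_codes (found_parts : List String) (original_codes : List String) (out : List String) : Prop := out = find_reconstructable_codes_alt found_parts original_codes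
instance (found_parts : List String) (original_codes : List String) (out : List String) : Decidable (Spec_find_reconstructable_codes found_parts original_codes out) := by unfold Spec_find_reconstructable_codes; infer_instance

-- ===== CLAIM (what is proved, stated in full; the proofs are below) =====
def Claim_equal_find_reconstructable_codes : Prop := ∀ (found_parts : List String) (original_codes : List String), Dom_find_reconstructable_codes found_parts original_codes → Spec_find_reconstructable_codes found_parts original_codes (find_reconstructable_codes found_parts original_codes)

-- ===== LEMMAS AND PROOFS =====

-- A's per-step update (exactly the lambda in pvACheck)
def pvStepA (W : PySem.Set (List Char)) (s : List Char) (dp : List Bool) (i : Int) : List Bool :=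
  if (PySem.List.pyRange 0 i 1).any (fun j =>
        PySem.List.pyGetD dp j false &&
        W.contains (PySem.List.slice s (some j) (some i)))
  then PySem.List.pySetD dp i true else dp

-- B's per-step update (exactly the lambda in pvBCheck)
def pvStepB (W : PySem.Set (List Char)) (lens : List Int) (s : List Char) (dp : List Bool) (i : Int) : List Bool :=
  dp ++ [lens.any (fun L =>
    decide (L ≤ i) && PySem.List.pyGetD dp (i - L) false &&
    W.contains (PySem.List.slice s (some (i - L)) (some i)))]

def pvDpA (W : PySem.Set (List Char)) (s : List Char) (k : Nat) : List Bool :=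
  (PySem.List.pyRange 1 ((k : Int) + 1) 1).foldl (pvStepA W s)
    (PySem.List.pySetD (List.replicate (s.length + 1) false) 0 true)

def pvDpB (W : PySem.Set (List Char)) (s : List Char) (k : Nat) : List Bool :=
  (PySem.List.pyRange 1 ((k : Int) + 1) 1).foldl (pvStepB W (pvBLens W) s) [true]

-- the two inner conditions agree when the dp prefixes agree
theorem pv_cond_eq (W : PySem.Set (List Char)) (s : List Char) (dpA dpB : List Bool) (k : Nat)
    (hk : k < s.length)
    (hj : ∀ j : Nat, PySem.List.pyGetD dpA (j : Int) false = PySem.List.pyGetD dpB (j : Int) false) :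
    ((PySem.List.pyRange 0 (((k + 1 : Nat) : Int)) 1).any (fun j =>
        PySem.List.pyGetD dpA j false &&
        W.contains (PySem.List.slice s (some j) (some ((k + 1 : Nat) : Int)))))
    = ((pvBLens W).any (fun L =>
        decide (L ≤ ((k + 1 : Nat) : Int)) &&
        PySem.List.pyGetD dpB (((k + 1 : Nat) : Int) - L) false &&
        W.contains (PySem.List.slice s (some (((k + 1 : Nat) : Int) - L)) (some ((k + 1 : Nat) : Int))))) := by
  have hiff : ∀ a b : Bool, (a = true ↔ b = true) → a = b := by
    intro a b h; cases a <;> cases b <;> simp_all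
  apply hiff
  constructor
  · intro h
    rw [List.any_eq_true] at h
    obtain ⟨j, hjmem, hp⟩ := h
    rw [PySem.List.mem_pyRange_one] at hjmem
    obtain ⟨jn, rfl⟩ : ∃ jn : Nat, j = (jn : Int) :=
      ⟨j.toNat, (Int.toNat_of_nonneg hjmem.1).symm⟩
    have hjk : jn < k + 1 := by exact_mod_cast hjmem.2
    rw [Bool.and_eq_true] at hp
    obtain ⟨hdpj, hcont⟩ := hp
    rw [PySem.List.slice_natCast] at hcont
    set w : List Char := List.take (k + 1 - jn) (List.drop jn s) with hw_def
    have hw : w ∈ W := (PySem.Set.contains_iff W w).mp hcont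
    have hwlen : w.length = k + 1 - jn := by
      simp [hw_def]; omega
    have hwne : ¬ w.isEmpty := by
      rw [List.isEmpty_iff_length_eq_zero, hwlen]; omega
    have hmem : ((w.length : Int)) ∈ pvBLens W := by
      unfold pvBLens
      rw [PySem.List.mem_sorted, PySem.Set.mem_ofList]
      exact List.mem_map.mpr ⟨w, List.mem_filter.mpr ⟨hw, by simp [hwne]⟩, rfl⟩
    rw [List.any_eq_true]
    refine ⟨(w.length : Int), hmem, ?_⟩
    have hL : ((w.length : Int)) = ((k + 1 : Nat) : Int) - (jn : Int) := by
      rw [hwlen]; push_cast; omega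
    have hsub : ((k + 1 : Nat) : Int) - ((w.length : Int)) = (jn : Int) := by
      rw [hL]; ring
    rw [Bool.and_eq_true, Bool.and_eq_true, hsub]
    refine ⟨⟨?_, ?_⟩, ?_⟩
    · simp [hL]
    · rw [← hj jn]; exact hdpj
    · rw [PySem.List.slice_natCast]; exact hcont
  · intro h
    rw [List.any_eq_true] at h
    obtain ⟨L, hLmem, hp⟩ := h
    unfold pvBLens at hLmem
    rw [PySem.List.mem_sorted, PySem.Set.mem_ofList] at hLmem
    obtain ⟨w, hwf, rfl⟩ := List.mem_map.mp hLmem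
    obtain ⟨hw, hne⟩ := List.mem_filter.mp hwf
    have hw1 : 1 ≤ w.length := by
      rcases Nat.eq_zero_or_pos w.length with h0 | h1
      · exfalso; rw [List.isEmpty_iff_length_eq_zero.mpr h0] at hne; simp at hne
      · exact h1
    rw [Bool.and_eq_true, Bool.and_eq_true] at hp
    obtain ⟨⟨hguard, hdp⟩, hcont⟩ := hp
    have hguard' : w.length ≤ k + 1 := by
      rw [decide_eq_true_eq] at hguard; exact_mod_cast hguard
    have hsub : ((k + 1 : Nat) : Int) - ((w.length : Int)) = ((k + 1 - w.length : Nat) : Int) := by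
      push_cast [hguard']; ring
    rw [List.any_eq_true]
    refine ⟨((k + 1 - w.length : Nat) : Int), ?_, ?_⟩
    · rw [PySem.List.mem_pyRange_one]
      constructor
      · positivity
      · exact_mod_cast Nat.sub_lt_of_pos_le hw1 hguard'
    · rw [Bool.and_eq_true]
      refine ⟨?_, ?_⟩
      · rw [hj (k + 1 - w.length), ← hsub]; exact hdp
      · rw [← hsub]; exact hcont

-- the invariant relating the two dp tables
theorem pv_dp_inv (W : PySem.Set (List Char)) (s : List Char) :
    ∀ k : Nat, k ≤ s.length →
      (pvDpA W s k).length = s.length + 1 ∧ (pvDpB W s k).length = k + 1 ∧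
      ∀ j : Nat, PySem.List.pyGetD (pvDpA W s k) (j : Int) false
               = PySem.List.pyGetD (pvDpB W s k) (j : Int) false := by
  intro k
  induction k with
  | zero =>
    intro _
    have hA : pvDpA W s 0 = (List.replicate (s.length + 1) false).set 0 true := by
      unfold pvDpA
      rw [PySem.List.pyRange_one_eq_nil (by omega)]
      simp [List.foldl_nil]
      rw [PySem.List.pySetD_of_nonneg _ _ (by omega)]
      rfl
    have hB : pvDpB W s 0 = [true] := by
      unfold pvDpB
      rw [PySem.List.pyRange_one_eq_nil (by omega)]
      rfl
    refine ⟨by simp [hA], by simp [hB], ?_⟩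
    intro j
    rw [hA, hB, PySem.List.pyGetD_natCast, PySem.List.pyGetD_natCast]
    cases j with
    | zero => simp
    | succ m =>
      by_cases h : m < s.length <;>
        simp [List.getD_eq_getElem?_getD, h]
  | succ k ih =>
    intro hk1
    have hk : k < s.length := by omega
    obtain ⟨hlA, hlB, hj⟩ := ih (by omega)
    have hcast : (((k + 1 : Nat) : Int)) + 1 = ((k : Int) + 1) + 1 := by push_cast; ring
    have hsplit : PySem.List.pyRange 1 (((k + 1 : Nat) : Int) + 1) 1
        = PySem.List.pyRange 1 ((k : Int) + 1) 1 ++ [((k : Int) + 1)] := by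
      rw [hcast, PySem.List.pyRange_one_succ_right (by omega)]
    have hi : ((k : Int) + 1) = (((k + 1 : Nat) : Int)) := by push_cast; ring
    have hA : pvDpA W s (k + 1) = pvStepA W s (pvDpA W s k) ((k : Int) + 1) := by
      unfold pvDpA; rw [hsplit, List.foldl_append]; rfl
    have hB : pvDpB W s (k + 1) = pvStepB W (pvBLens W) s (pvDpB W s k) ((k : Int) + 1) := by
      unfold pvDpB; rw [hsplit, List.foldl_append]; rfl
    have hcond : ((PySem.List.pyRange 0 ((k : Int) + 1) 1).any (fun j =>
          PySem.List.pyGetD (pvDpA W s k) j false &&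
          W.contains (PySem.List.slice s (some j) (some ((k : Int) + 1)))))
        = ((pvBLens W).any (fun L =>
          decide (L ≤ ((k : Int) + 1)) &&
          PySem.List.pyGetD (pvDpB W s k) (((k : Int) + 1) - L) false &&
          W.contains (PySem.List.slice s (some (((k : Int) + 1) - L)) (some ((k : Int) + 1))))) := by
      rw [hi]; exact pv_cond_eq W s (pvDpA W s k) (pvDpB W s k) k hk hj
    set c : Bool := ((pvBLens W).any (fun L =>
          decide (L ≤ ((k : Int) + 1)) &&
          PySem.List.pyGetD (pvDpB W s k) (((k : Int) + 1) - L) false &&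
          W.contains (PySem.List.slice s (some (((k : Int) + 1) - L)) (some ((k : Int) + 1))))) with hc_def
    have hstepA : pvDpA W s (k + 1)
        = if c then PySem.List.pySetD (pvDpA W s k) ((k : Int) + 1) true else pvDpA W s k := by
      rw [hA]; unfold pvStepA; rw [hcond]
    have hstepB : pvDpB W s (k + 1) = pvDpB W s k ++ [c] := by
      rw [hB]; unfold pvStepB; rfl
    have hgetB : ∀ j : Nat, PySem.List.pyGetD (pvDpB W s (k + 1)) (j : Int) false
        = if j < k + 1 then PySem.List.pyGetD (pvDpB W s k) (j : Int) false
          else if j = k + 1 then c else false := by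
      intro j
      rw [hstepB, PySem.List.pyGetD_natCast, List.getD_eq_getElem?_getD, List.getElem?_append]
      by_cases h1 : j < k + 1
      · simp [hlB, h1, PySem.List.pyGetD_natCast, List.getD_eq_getElem?_getD]
      · by_cases h2 : j = k + 1
        · subst h2; simp [hlB]
        · rw [if_neg (by omega), List.getElem?_eq_none (by simp [hlB]; omega)]
          simp [h1, h2]
    have hBout : ∀ j : Nat, k + 1 ≤ j → PySem.List.pyGetD (pvDpB W s k) (j : Int) false = false := by
      intro j hjge
      rw [PySem.List.pyGetD_natCast, List.getD_eq_getElem?_getD,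
        List.getElem?_eq_none (by omega)]
      rfl
    have hgetA : ∀ j : Nat, PySem.List.pyGetD (pvDpA W s (k + 1)) (j : Int) false
        = if j = k + 1 then c else PySem.List.pyGetD (pvDpA W s k) (j : Int) false := by
      intro j
      rw [hstepA, hi]
      by_cases hcv : c = true
      · rw [if_pos hcv, PySem.List.pyGetD_pySetD_natCast _ _ _ _ _ (by omega)]
        by_cases h2 : j = k + 1 <;> simp [h2, hcv]
      · simp only [Bool.not_eq_true] at hcv
        rw [hcv]
        simp only [Bool.false_eq_true, if_false]
        by_cases h2 : j = k + 1
        · subst h2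
          rw [if_pos rfl, hj (k + 1), hBout (k + 1) (le_refl _)]
        · rw [if_neg h2]
    refine ⟨?_, ?_, ?_⟩
    · rw [hstepA]
      by_cases hcv : c = true
      · simp [hcv, PySem.List.length_pySetD, hlA]
      · simp only [Bool.not_eq_true] at hcv; simp [hcv, hlA]
    · rw [hstepB]; simp [hlB]
    · intro j
      rw [hgetA j, hgetB j]
      by_cases h1 : j < k + 1
      · rw [if_pos h1, if_neg (by omega)]
        exact hj j
      · by_cases h2 : j = k + 1
        · rw [if_pos h2, if_neg (by omega), if_pos h2]
        · rw [if_neg h2, if_neg h1, if_neg h2, hj j, hBout j (by omega)]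

theorem check_eq (W : PySem.Set (List Char)) (s : List Char) :
    pvACheck W s = pvBCheck W (pvBLens W) s := by
  have h := pv_dp_inv W s s.length (le_refl _)
  show PySem.List.pyGetD (pvDpA W s s.length) ((s.length : Nat) : Int) false
     = PySem.List.pyGetD (pvDpB W s s.length) ((s.length : Nat) : Int) false
  exact h.2.2 s.length

-- ===== VERDICT (by name: the statement is the Claim_ definition above) =====
theorem find_reconstructable_codes_spec : Claim_equal_find_reconstructable_codes := by
  intro fp oc _
  unfold Spec_find_reconstructable_codes find_reconstructable_codes find_reconstructable_codes_alt
  simp only [check_eq]
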